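-- pv_equiv track=rewrite | github.com/sancern-zhou/suyuan | backend/app/fetchers/city_statistics/province_statistics_fetcher.py | validate_ranking_continuity
-- ===== SOURCE A (Python) =====
-- from typing import List, Dict, Tuple, Optional
--
-- def validate_ranking_continuity(statistics: List[Dict]) -> List[str]:
--     """验证排名连续性"""
--     warnings = []
--
--     ranks = sorted([s['comprehensive_index_rank'] for s in statistics
--                    if s.get('comprehensive_index_rank') is not None])
--     expected_ranks = list(range(1, len(ranks) + 1))
--
--     if ranks != expected_ranks:
--         warnings.append(f"排名不连续: {ranks}")
--
--     return warnings
-- ===== SOURCE B (Python) =====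
-- def validate_ranking_continuity(statistics):
--     """验证排名连续性"""
--     vals = [s['comprehensive_index_rank'] for s in statistics
--             if s.get('comprehensive_index_rank') is not None]
--     n = len(vals)
--     if len(set(vals)) == n and all(1 <= v <= n for v in vals):
--         return []
--     return [f"排名不连续: {sorted(vals)}"]
-- ===== Notes on version B (the rewrite author's own statement) =====
-- stated objective: alternative
-- what changed: Replaces A's sort-then-compare-against-range(1,n+1) check with a set/bounds test (all values distinct and within 1..n), sorting only on the failure path to build the warning.
import Mathlib
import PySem

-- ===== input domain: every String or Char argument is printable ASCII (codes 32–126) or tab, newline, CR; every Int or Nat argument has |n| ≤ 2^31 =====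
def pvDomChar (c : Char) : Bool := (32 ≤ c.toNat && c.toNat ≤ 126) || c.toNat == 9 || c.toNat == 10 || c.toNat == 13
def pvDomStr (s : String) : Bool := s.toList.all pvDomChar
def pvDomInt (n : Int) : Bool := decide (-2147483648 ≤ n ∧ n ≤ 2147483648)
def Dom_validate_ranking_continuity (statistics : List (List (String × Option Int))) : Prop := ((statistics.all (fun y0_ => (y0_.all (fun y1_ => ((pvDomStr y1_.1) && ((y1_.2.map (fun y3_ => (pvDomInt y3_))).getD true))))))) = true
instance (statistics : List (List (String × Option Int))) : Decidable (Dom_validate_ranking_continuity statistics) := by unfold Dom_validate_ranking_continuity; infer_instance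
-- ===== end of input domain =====

-- B replaces A's sort-then-compare-against-range check by a set-cardinality + bounds test,
-- sorting only on the failure path (objective: alternative algorithm, same cost class).

-- shared dict-access helper: s.get('comprehensive_index_rank') — first-match lookup,
-- Python None iff the key is absent or its stored value is None
def pvRankOf (s : List (String × Option Int)) : Option Int :=
  match s.find? (fun p => p.1 == "comprehensive_index_rank") with
  | some p => p.2
  | none => none

-- shared string formatting: f"排名不连续: {ranks}" for a Python list of ints
def pvFmtWarn (xs : List Int) : String :=
  "排名不连续: [" ++ PySem.Str.join ", " (xs.map PySem.Int.toStr) ++ "]"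

-- ===== PORT A =====
def validate_ranking_continuity (statistics : List (List (String × Option Int))) : List String :=
  let ranks := PySem.List.sorted (statistics.filterMap pvRankOf) (fun x => x) false
  let expected_ranks := PySem.List.pyRange 1 ((ranks.length : Int) + 1) 1
  if ranks ≠ expected_ranks then [pvFmtWarn ranks] else []

-- ===== PORT B =====
def validate_ranking_continuity_alt (statistics : List (List (String × Option Int))) : List String :=
  let vals := statistics.filterMap pvRankOf
  let n := vals.length
  if (PySem.Set.ofList vals).length = n ∧ ∀ v ∈ vals, 1 ≤ v ∧ v ≤ (n : Int) then []
  else [pvFmtWarn (PySem.List.sorted vals (fun x => x) false)]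

-- ===== PRECONDITION & SPEC =====
def Spec_validate_ranking_continuity (statistics : List (List (String × Option Int))) (out : List String) : Prop := out = validate_ranking_continuity_alt statistics
instance (statistics : List (List (String × Option Int))) (out : List String) : Decidable (Spec_validate_ranking_continuity statistics out) := by unfold Spec_validate_ranking_continuity; infer_instance

-- ===== CLAIM (what is proved, stated in full; the proofs are below) =====
def Claim_equal_validate_ranking_continuity : Prop := ∀ (statistics : List (List (String × Option Int))), Dom_validate_ranking_continuity statistics → Spec_validate_ranking_continuity statistics (validate_ranking_continuity statistics)

-- ===== LEMMAS AND PROOFS =====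

-- foldl Set.add over a nodup suffix appends it
theorem pv_foldl_add_of_nodup {xs acc : List Int} (h : (acc ++ xs).Nodup) :
    xs.foldl PySem.Set.add acc = acc ++ xs := by
  induction xs generalizing acc with
  | nil => simp
  | cons a t ih =>
    have hna : a ∉ acc := by
      intro hmem
      exact (List.disjoint_of_nodup_append h) hmem (by simp)
    have hstep : PySem.Set.add acc a = acc ++ [a] := by
      simp [PySem.Set.add, List.contains_eq_mem, hna]
    rw [List.foldl_cons, hstep, ih (by simpa using h)]
    simp

theorem pv_ofList_eq_self {xs : List Int} (h : xs.Nodup) : PySem.Set.ofList xs = xs := by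
  simpa [PySem.Set.ofList, PySem.Set.empty] using pv_foldl_add_of_nodup (acc := []) (by simpa using h)

-- the core characterisation: sorted(vals) == range(1, n+1) iff vals are n distinct values in 1..n
theorem pv_key (vals : List Int) :
    (PySem.List.sorted vals (fun x => x) false = PySem.List.pyRange 1 ((vals.length : Int) + 1) 1)
    ↔ ((PySem.Set.ofList vals).length = vals.length ∧ ∀ v ∈ vals, 1 ≤ v ∧ v ≤ (vals.length : Int)) := by
  constructor
  · intro h
    have hperm : vals.Perm (PySem.List.pyRange 1 ((vals.length : Int) + 1) 1) :=
      ((PySem.List.sorted_perm vals (fun x => x) false).symm.trans (h ▸ List.Perm.refl _))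
    have hnodup : vals.Nodup := hperm.nodup_iff.mpr (PySem.List.nodup_pyRange_one _ _)
    refine ⟨by rw [pv_ofList_eq_self hnodup], ?_⟩
    intro v hv
    have := PySem.List.mem_pyRange_one.mp (hperm.mem_iff.mp hv)
    omega
  · rintro ⟨hcard, hbound⟩
    have hnodup : vals.Nodup := by
      have hsub : PySem.Set.ofList vals ⊆ vals := by
        intro x hx
        rw [← PySem.List.dedup_eq_ofList] at hx
        exact (PySem.List.mem_dedup vals x).mp hx
      have hnd : (PySem.Set.ofList vals : List Int).Nodup := by
        rw [← PySem.List.dedup_eq_ofList]; exact PySem.List.nodup_dedup vals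
      have hp : (PySem.Set.ofList vals : List Int).Perm vals :=
        (hnd.subperm hsub).perm_of_length_le (by omega)
      exact hp.nodup_iff.mp hnd
    have hlen : (PySem.List.pyRange 1 ((vals.length : Int) + 1) 1).length = vals.length := by
      rw [PySem.List.length_pyRange_one]; omega
    have hsub : vals ⊆ PySem.List.pyRange 1 ((vals.length : Int) + 1) 1 := by
      intro v hv
      have := hbound v hv
      exact PySem.List.mem_pyRange_one.mpr (by omega)
    have hperm : vals.Perm (PySem.List.pyRange 1 ((vals.length : Int) + 1) 1) :=
      (hnodup.subperm hsub).perm_of_length_le (by omega)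
    exact PySem.List.sorted_eq_of_perm_of_pairwise_lt vals _ (fun x => x)
      hperm.symm (PySem.List.pairwise_lt_pyRange_one 1 _)

-- ===== VERDICT (by name: the statement is the Claim_ definition above) =====
theorem validate_ranking_continuity_spec : Claim_equal_validate_ranking_continuity := by
  unfold Claim_equal_validate_ranking_continuity
  intro statistics _
  unfold Spec_validate_ranking_continuity validate_ranking_continuity validate_ranking_continuity_alt
  have h := pv_key (statistics.filterMap pvRankOf)
  simp only [PySem.List.length_sorted]
  by_cases hc : PySem.List.sorted (statistics.filterMap pvRankOf) (fun x => x) false =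
      PySem.List.pyRange 1 (((statistics.filterMap pvRankOf).length : Int) + 1) 1
  · rw [if_neg (by simpa using hc), if_pos (h.mp hc)]
  · rw [if_pos (by simpa using hc), if_neg (fun hb => hc (h.mpr hb))]
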